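-- pv_equiv track=rewrite | github.com/jonyxdxp/notebooks_meta | v6/s1/utils/AdafacLO.py | _factored_dims
-- ===== SOURCE A (Python) =====
-- from typing import Optional
-- from typing import List, Optional, Tuple, Union
--
-- def _factored_dims(
--     shape: Tuple[int, ...], factored: bool, min_dim_size_to_factor: int
-- ) -> Optional[tuple[int, int]]:
--     """Whether to use a factored second moment estimator.
--
--     This function returns a tuple with the two largest axes to reduce over.
--     If no two dimensions have size >= min_dim_size_to_factor, return None.
--
--     Args:
--       shape: an input shape
--       factored: whether to use factored second-moment estimator for > 2d vars.
--       min_dim_size_to_factor: only factor accumulator if two array dimensions have at least this size.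
--
--     Returns:
--       None or a tuple of ints
--     """
--     if not factored or len(shape) < 2:
--         return None
--     sorted_dims = sorted(((x, i) for i, x in enumerate(shape)))
--     if shape[sorted_dims[-2][1]] < min_dim_size_to_factor:
--         return None
--     return int(sorted_dims[-2][1]), int(sorted_dims[-1][1])
-- ===== SOURCE B (Python) =====
-- def _factored_dims(shape, factored, min_dim_size_to_factor):
--     if not factored or len(shape) < 2:
--         return None
--     best_size = best_idx = second_size = second_idx = None
--     for i, x in enumerate(shape):
--         # a later element displaces an earlier one on ties (larger index wins),
--         # matching lexicographic (size, index) order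
--         if best_size is None or x >= best_size:
--             second_size, second_idx = best_size, best_idx
--             best_size, best_idx = x, i
--         elif second_size is None or x >= second_size:
--             second_size, second_idx = x, i
--     if second_size < min_dim_size_to_factor:
--         return None
--     return int(second_idx), int(best_idx)
-- ===== Notes on version B (the rewrite author's own statement) =====
-- stated objective: faster
-- what changed: Replaces the full sort of (size, index) pairs plus negative indexing by a single pass that tracks the largest and second-largest (size, index) pair with the same lexicographic tie-break (larger index wins among equal sizes).
import Mathlib
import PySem

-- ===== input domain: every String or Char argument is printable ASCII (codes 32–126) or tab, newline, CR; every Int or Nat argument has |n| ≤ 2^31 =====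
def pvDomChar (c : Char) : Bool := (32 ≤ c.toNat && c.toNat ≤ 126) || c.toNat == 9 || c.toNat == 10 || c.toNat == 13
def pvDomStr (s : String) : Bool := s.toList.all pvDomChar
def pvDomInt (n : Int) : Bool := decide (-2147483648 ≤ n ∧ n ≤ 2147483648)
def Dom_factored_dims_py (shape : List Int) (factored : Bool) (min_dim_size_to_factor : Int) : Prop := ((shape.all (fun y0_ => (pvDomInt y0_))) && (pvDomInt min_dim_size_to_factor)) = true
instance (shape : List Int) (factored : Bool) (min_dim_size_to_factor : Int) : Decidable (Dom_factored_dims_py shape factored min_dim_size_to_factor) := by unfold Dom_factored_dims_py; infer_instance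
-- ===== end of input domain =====

-- B replaces A's full sort of (size, index) pairs by a single pass that tracks the
-- largest and second-largest (size, index) pair; same return value, no sort.

-- ===== PORT A =====
-- A: sort ((x, i) for i, x in enumerate(shape)) lexicographically, read entries -2 and -1.
def factored_dims_py (shape : List Int) (factored : Bool) (min_dim_size_to_factor : Int) : Option (Int × Int) :=
  if !factored || decide (shape.length < 2) then none
  else
    let sorted_dims := PySem.List.sorted2
      ((PySem.List.enumerate shape).map (fun q => (q.2, q.1)))
      (fun p => p.1) (fun p => p.2)
    match PySem.List.pyGet? sorted_dims (-2) with
    | none => none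
    | some p2 =>
      match PySem.List.pyGet? shape p2.2 with
      | none => none
      | some v =>
        if v < min_dim_size_to_factor then none
        else
          match PySem.List.pyGet? sorted_dims (-1) with
          | none => none
          | some p1 => some (p2.2, p1.2)

-- ===== PORT B =====
-- one loop step of B: state is (second, best), each an optional (size, index) pair;
-- q is an (index, value) pair from enumerate(shape)
def bstep (st : Option (Int × Int) × Option (Int × Int)) (q : Int × Int) :
    Option (Int × Int) × Option (Int × Int) :=
  match st with
  | (_, none) => (none, some (q.2, q.1))
  | (sec, some b) =>
    if b.1 ≤ q.2 then (some b, some (q.2, q.1))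
    else
      match sec with
      | none => (some (q.2, q.1), some b)
      | some s => if s.1 ≤ q.2 then (some (q.2, q.1), some b) else (some s, some b)

def factored_dims_py_alt (shape : List Int) (factored : Bool) (min_dim_size_to_factor : Int) : Option (Int × Int) :=
  if !factored || decide (shape.length < 2) then none
  else
    match (PySem.List.enumerate shape).foldl bstep (none, none) with
    | (some s, some b) =>
        if s.1 < min_dim_size_to_factor then none else some (s.2, b.2)
    | _ => none

-- ===== PRECONDITION & SPEC =====
def Spec_factored_dims_py (shape : List Int) (factored : Bool) (min_dim_size_to_factor : Int) (out : Option (Int × Int)) : Prop := out = factored_dims_py_alt shape factored min_dim_size_to_factor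
instance (shape : List Int) (factored : Bool) (min_dim_size_to_factor : Int) (out : Option (Int × Int)) : Decidable (Spec_factored_dims_py shape factored min_dim_size_to_factor out) := by unfold Spec_factored_dims_py; infer_instance

-- ===== CLAIM (what is proved, stated in full; the proofs are below) =====
def Claim_equal_factored_dims_py : Prop := ∀ (shape : List Int) (factored : Bool) (min_dim_size_to_factor : Int), Dom_factored_dims_py shape factored min_dim_size_to_factor → Spec_factored_dims_py shape factored min_dim_size_to_factor (factored_dims_py shape factored min_dim_size_to_factor)

-- ===== LEMMAS AND PROOFS =====

-- the comparator sorted2 uses on (size, index) pairs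
def bef (a b : Int × Int) : Bool :=
  decide (a.1 < b.1) || (!decide (b.1 < a.1) && decide (a.2 < b.2))

-- B's step, reoriented to consume a (size, index) pair as produced on A's side
def astep (st : Option (Int × Int) × Option (Int × Int)) (p : Int × Int) :
    Option (Int × Int) × Option (Int × Int) := bstep st (p.2, p.1)

-- last two entries of a list: (l[-2], l[-1])
def last2 : List (Int × Int) → Option (Int × Int) × Option (Int × Int)
  | [] => (none, none)
  | [b] => (none, some b)
  | [a, b] => (some a, some b)
  | _ :: b :: c :: t => last2 (b :: c :: t)

theorem sorted2_eq_fold (xs : List (Int × Int)) :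
    PySem.List.sorted2 xs (fun p => p.1) (fun p => p.2) =
      xs.foldl (fun acc x => PySem.List.insertBy bef x acc) [] := rfl

theorem insertBy_nil (f : Int × Int → Int × Int → Bool) (x : Int × Int) :
    PySem.List.insertBy f x [] = [x] := rfl

theorem insertBy_cons (f : Int × Int → Int × Int → Bool) (x y : Int × Int)
    (ys : List (Int × Int)) :
    PySem.List.insertBy f x (y :: ys) =
      if f x y then x :: y :: ys else y :: PySem.List.insertBy f x ys := rfl

theorem bef_of_idx_lt {a b : Int × Int} (h : b.2 < a.2) :
    bef a b = decide (a.1 < b.1) := by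
  simp [bef]
  omega

theorem length_insertBy (f : Int × Int → Int × Int → Bool) (x : Int × Int) :
    ∀ l : List (Int × Int), (PySem.List.insertBy f x l).length = l.length + 1 := by
  intro l
  induction l with
  | nil => rfl
  | cons y ys ih =>
    rw [insertBy_cons]
    split <;> simp [ih]

theorem pairwise_insertBy {p : Int × Int} {l : List (Int × Int)}
    (hs : l.Pairwise (fun a b => a.1 ≤ b.1)) (hidx : ∀ a ∈ l, a.2 < p.2) :
    (PySem.List.insertBy bef p l).Pairwise (fun a b => a.1 ≤ b.1) := by
  induction l with
  | nil => simp [insertBy_nil]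
  | cons y ys ih =>
    rw [List.pairwise_cons] at hs
    rw [insertBy_cons, bef_of_idx_lt (hidx y (by simp))]
    split
    · rename_i hlt; simp at hlt
      rw [List.pairwise_cons]
      refine ⟨?_, List.pairwise_cons.mpr hs⟩
      intro a ha
      simp only [List.mem_cons] at ha
      rcases ha with rfl | ha
      · omega
      · have := hs.1 a ha
        omega
    · rename_i hge; simp at hge
      rw [List.pairwise_cons]
      refine ⟨?_, ih hs.2 (fun a ha => hidx a (by simp [ha]))⟩
      intro a ha
      rcases (PySem.List.mem_insertBy bef p a ys).mp ha with h | h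
      · subst h; omega
      · exact hs.1 a h

theorem last2_cons_of_two_le (a : Int × Int) {l : List (Int × Int)}
    (h : 2 ≤ l.length) : last2 (a :: l) = last2 l := by
  match l with
  | [] => simp at h
  | [b] => simp at h
  | b :: c :: t => rfl

theorem last2_fst_mem {l : List (Int × Int)} {x : Int × Int}
    (h : (last2 l).1 = some x) : x ∈ l := by
  induction l using last2.induct with
  | case1 => simp [last2] at h
  | case2 b => simp [last2] at h
  | case3 a b => simp [last2] at h; simp [h]
  | case4 a b c t ih =>
    rw [last2] at h
    simp [ih h]

theorem last2_snd_mem {l : List (Int × Int)} {x : Int × Int}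
    (h : (last2 l).2 = some x) : x ∈ l := by
  induction l using last2.induct with
  | case1 => simp [last2] at h
  | case2 b => simp [last2] at h; simp [h]
  | case3 a b => simp [last2] at h; simp [h]
  | case4 a b c t ih =>
    rw [last2] at h
    simp [ih h]

theorem last2_some_of_two_le {l : List (Int × Int)} (h : 2 ≤ l.length) :
    ∃ s b, last2 l = (some s, some b) := by
  induction l using last2.induct with
  | case1 => simp at h
  | case2 b => simp at h
  | case3 a b => exact ⟨a, b, rfl⟩
  | case4 a b c t ih =>
    rw [last2]
    exact ih (by simp only [List.length_cons]; omega)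

-- the crucial step: inserting a pair with the largest index into a sorted list
-- moves the (second-last, last) pair exactly as B's loop step does
theorem last2_insertBy {l : List (Int × Int)} {p : Int × Int}
    (hs : l.Pairwise (fun a b => a.1 ≤ b.1)) (hidx : ∀ a ∈ l, a.2 < p.2) :
    last2 (PySem.List.insertBy bef p l) = astep (last2 l) p := by
  induction l with
  | nil => rfl
  | cons y ys ih =>
    rw [List.pairwise_cons] at hs
    rw [insertBy_cons, bef_of_idx_lt (hidx y (by simp))]
    match ys, hs with
    | [], hs =>
      split
      · rename_i hlt; simp at hlt
        have h1 : ¬ y.1 ≤ p.1 := by omega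
        simp [last2, astep, bstep, h1]
      · rename_i hge; simp at hge
        rw [insertBy_nil]
        simp [last2, astep, bstep, hge]
    | [z], hs =>
      have hyz : y.1 ≤ z.1 := hs.1 z (by simp)
      split
      · rename_i hlt; simp at hlt
        have h1 : ¬ z.1 ≤ p.1 := by omega
        have h2 : ¬ y.1 ≤ p.1 := by omega
        simp [last2, astep, bstep, h1, h2]
      · rename_i hge; simp at hge
        rw [insertBy_cons, bef_of_idx_lt (hidx z (by simp))]
        split
        · rename_i hlt2; simp at hlt2
          have h1 : ¬ z.1 ≤ p.1 := by omega
          simp [last2, astep, bstep, h1, hge]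
        · rename_i hge2; simp at hge2
          rw [insertBy_nil]
          simp [last2, astep, bstep, hge2]
    | z :: w :: t, hs =>
      have hlen : 2 ≤ (PySem.List.insertBy bef p (z :: w :: t)).length := by
        rw [length_insertBy]; simp
      split
      · rename_i hlt; simp at hlt
        -- p is smaller than every element: the last two pairs are unchanged
        rw [show last2 (p :: y :: z :: w :: t) = last2 (z :: w :: t) from rfl,
            show last2 (y :: z :: w :: t) = last2 (z :: w :: t) from rfl]
        obtain ⟨s, b, hsb⟩ := last2_some_of_two_le (l := z :: w :: t) (by simp)
        have hsmem := last2_fst_mem (l := z :: w :: t) (by rw [hsb])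
        have hbmem := last2_snd_mem (l := z :: w :: t) (by rw [hsb])
        have hys : y.1 ≤ s.1 := hs.1 s (by simpa using hsmem)
        have hyb : y.1 ≤ b.1 := hs.1 b (by simpa using hbmem)
        rw [hsb]
        have h1 : ¬ b.1 ≤ p.1 := by omega
        have h2 : ¬ s.1 ≤ p.1 := by omega
        simp [astep, bstep, h1, h2]
      · rename_i hge; simp at hge
        rw [last2_cons_of_two_le y hlen,
            show last2 (y :: z :: w :: t) = last2 (z :: w :: t) from rfl]
        exact ih hs.2 (fun a ha => hidx a (by simp [ha]))

theorem fold_last2 :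
    ∀ (ps l : List (Int × Int)),
      l.Pairwise (fun a b => a.1 ≤ b.1) →
      (∀ a ∈ l, ∀ q ∈ ps, a.2 < q.2) →
      ps.Pairwise (fun u v => u.2 < v.2) →
      last2 (ps.foldl (fun acc x => PySem.List.insertBy bef x acc) l) =
        ps.foldl astep (last2 l) := by
  intro ps
  induction ps with
  | nil => intro l _ _ _; rfl
  | cons p ps' ih =>
    intro l hsort hidx hps
    rw [List.pairwise_cons] at hps
    simp only [List.foldl_cons]
    rw [← last2_insertBy hsort (fun a ha => hidx a ha p (by simp))]
    apply ih
    · exact pairwise_insertBy hsort (fun a ha => hidx a ha p (by simp))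
    · intro a ha q hq
      rcases (PySem.List.mem_insertBy bef p a l).mp ha with h | h
      · subst h; exact hps.1 q hq
      · exact hidx a h q (by simp [hq])
    · exact hps.2

theorem length_foldl_insertBy :
    ∀ (ps acc : List (Int × Int)),
      (ps.foldl (fun acc x => PySem.List.insertBy bef x acc) acc).length =
        acc.length + ps.length := by
  intro ps
  induction ps with
  | nil => simp
  | cons x xs ihx =>
    intro acc
    simp only [List.foldl_cons]
    rw [ihx, length_insertBy]
    simp only [List.length_cons]
    omega

theorem pyGet_cons_neg (a : Int × Int) (l : List (Int × Int)) (i : Int)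
    (hlo : -(l.length : Int) ≤ i) (hhi : i < 0) :
    PySem.List.pyGet? (a :: l) i = PySem.List.pyGet? l i := by
  simp only [PySem.List.pyGet?, PySem.List.pyIdx?, List.length_cons]
  have h0 : ¬ (0 ≤ i) := by omega
  have h1 : -((l.length : Int) + 1) ≤ i := by omega
  rw [if_neg h0, if_neg h0, if_pos (by push_cast; omega), if_pos hlo]
  simp only [Option.bind_some]
  have hm1 : 1 ≤ (-i).toNat := by omega
  have hm2 : (-i).toNat ≤ l.length := by omega
  rw [show l.length + 1 - (-i).toNat = (l.length - (-i).toNat) + 1 by omega]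
  simp

-- ===== VERDICT (by name: the statement is the Claim_ definition above) =====
theorem last2_eq_pyGet (l : List (Int × Int)) :
    last2 l = (PySem.List.pyGet? l (-2), PySem.List.pyGet? l (-1)) := by
  induction l using last2.induct with
  | case1 => rfl
  | case2 b => rfl
  | case3 a b => rfl
  | case4 a b c t ih =>
    rw [last2, ih,
        pyGet_cons_neg a (b :: c :: t) (-2) (by simp) (by omega),
        pyGet_cons_neg a (b :: c :: t) (-1) (by simp) (by omega)]

theorem factored_dims_py_spec : Claim_equal_factored_dims_py := by
  intro shape factored m _
  unfold Spec_factored_dims_py factored_dims_py factored_dims_py_alt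
  by_cases hg : (!factored || decide (shape.length < 2)) = true
  · simp only [hg]; rfl
  · rw [Bool.not_eq_true] at hg
    simp only [hg, Bool.false_eq_true, if_false]
    have hlen : 2 ≤ shape.length := by
      simp at hg; omega
    set pairs := (PySem.List.enumerate shape).map (fun q => (q.2, q.1)) with hpairs
    have hplen : pairs.length = shape.length := by
      simp [hpairs, PySem.List.length_enumerate]
    have hppw : pairs.Pairwise (fun u v => u.2 < v.2) := by
      exact (PySem.List.pairwise_lt_enumerate shape 0).map _ (fun a b h => h)
    have hfold := fold_last2 pairs [] (by simp) (by simp) hppw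
    rw [sorted2_eq_fold]
    obtain ⟨s, b, hsb⟩ : ∃ s b,
        last2 (pairs.foldl (fun acc x => PySem.List.insertBy bef x acc) []) =
          (some s, some b) := by
      apply last2_some_of_two_le
      rw [length_foldl_insertBy]
      omega
    have hget := last2_eq_pyGet
      (pairs.foldl (fun acc x => PySem.List.insertBy bef x acc) [])
    rw [hsb] at hget hfold
    rw [Prod.mk.injEq] at hget
    have hg2 := hget.1.symm
    have hg1 := hget.2.symm
    -- s is a genuine (size, index) pair of shape, so shape[s.2] = s.1
    have hsmem : s ∈ pairs := by
      have hm := last2_fst_mem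
        (l := pairs.foldl (fun acc x => PySem.List.insertBy bef x acc) []) (by rw [hsb])
      rw [← sorted2_eq_fold] at hm
      exact (PySem.List.sorted2_perm pairs (fun p => p.1) (fun p => p.2) false).subset hm
    have hshape : PySem.List.pyGet? shape s.2 = some s.1 := by
      simp only [hpairs, List.mem_map] at hsmem
      obtain ⟨q, hq, hqs⟩ := hsmem
      rw [PySem.List.mem_enumerate_iff] at hq
      obtain ⟨k, hk, hqk⟩ := hq
      subst hqk
      simp at hqs
      rw [← hqs]
      simp [PySem.List.pyGet?_natCast, List.getElem?_eq_getElem hk]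
    -- B's fold equals A's (second-last, last) pair
    have hbfold : (PySem.List.enumerate shape).foldl bstep (none, none) = (some s, some b) := by
      have hsw : ∀ (st : Option (Int × Int) × Option (Int × Int)) (q : Int × Int),
          astep st (q.2, q.1) = bstep st q := by
        intro st q; cases q; rfl
      rw [show ((none, none) : Option (Int × Int) × Option (Int × Int)) = last2 [] from rfl,
          hfold, hpairs, List.foldl_map]
      simp only [hsw]
    simp [hg2, hg1, hshape, hbfold]
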